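-- pv_equiv track=rewrite | github.com/Programming-Seungwan/ALGORITHM_STUDY_PRIVATE | 2024/Week17/kakao2022-mbti.py | solution
-- ===== SOURCE A (Python) =====
-- def solution(survey, choices):
--     answer = ''
--     dataDic = {"T": 0, "R": 0, "F": 0,"C": 0,"M": 0,"J": 0,"A": 0,"N": 0 }
--     arrayLeng = len(survey)
--
--     for i in range(0, arrayLeng):
--         surveryData = survey[i]
--         firstChar = surveryData[0]
--         secondChar = surveryData[1]
--         if choices[i] ==4 :
--             continue
--         if (choices[i] > 4):
--             dataDic[secondChar] += (choices[i] - 4)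
--         if (choices[i] < 4):
--             dataDic[firstChar] += (4 - choices[i])
--
--     if dataDic["T"] > dataDic["R"]:
--         answer += "T"
--     elif dataDic["T"] == dataDic["R"]:
--         answer += "R"
--     if dataDic["T"] < dataDic["R"]:
--         answer += "R"
--
--     if dataDic["F"] > dataDic["C"]:
--         answer += "F"
--     elif dataDic["F"] == dataDic["C"]:
--         answer += "C"
--     if dataDic["F"] < dataDic["C"]:
--         answer += "C"
--
--     if dataDic["M"] > dataDic["J"]:
--         answer += "M"
--     elif dataDic["M"] == dataDic["J"]:
--         answer += "J"
--     if dataDic["M"] < dataDic["J"]: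
--         answer += "J"
--
--     if dataDic["A"] > dataDic["N"]:
--         answer += "A"
--     elif dataDic["A"] == dataDic["N"]:
--         answer += "A"
--     if dataDic["A"] < dataDic["N"]:
--         answer += "N"
--     return answer
-- ===== SOURCE B (Python) =====
-- def solution(survey, choices):
--     # per-letter score computed on demand; each output letter is the max of its
--     # pair under key (score, -ord), so a tie picks the alphabetically smaller letter
--     def score(L):
--         return (sum(4 - c for s, c in zip(survey, choices) if c < 4 and s[0] == L)
--                 + sum(c - 4 for s, c in zip(survey, choices) if c > 4 and s[1] == L))
--     return ''.join(max(pair, key=lambda L: (score(L), -ord(L)))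
--                    for pair in ("TR", "FC", "MJ", "AN"))
-- ===== Notes on version B (the rewrite author's own statement) =====
-- stated objective: idiomatic
-- what changed: Replaces A's mutable eight-counter dict plus four unrolled if/elif/if comparison chains with a pure per-letter score function (two filtered comprehension sums over zip(survey, choices)) and picks each output letter as max(pair, key=(score, -ord)), encoding the tie-to-alphabetically-smaller-letter rule in the key instead of branch order.
import Mathlib
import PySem

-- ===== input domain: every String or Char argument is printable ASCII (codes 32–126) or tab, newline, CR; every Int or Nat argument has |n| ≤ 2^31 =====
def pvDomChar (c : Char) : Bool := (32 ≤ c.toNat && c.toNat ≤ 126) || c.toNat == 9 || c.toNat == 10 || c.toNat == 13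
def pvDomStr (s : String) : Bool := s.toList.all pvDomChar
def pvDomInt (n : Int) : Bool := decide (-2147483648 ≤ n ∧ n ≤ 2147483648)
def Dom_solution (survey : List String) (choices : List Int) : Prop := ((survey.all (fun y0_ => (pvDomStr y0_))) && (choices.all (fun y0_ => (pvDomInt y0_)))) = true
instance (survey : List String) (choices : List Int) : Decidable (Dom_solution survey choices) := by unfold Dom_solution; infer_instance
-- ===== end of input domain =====

-- B replaces A's mutable eight-counter dict and unrolled if/elif/if comparison chains with a
-- pure per-letter score function (two comprehension sums) and max-by-(score, -ord) per pair (idiomatic).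


-- ===== PORT A =====

-- dataDic = {"T": 0, ...} — all keys are single characters, kept as Char
def solInit : PySem.Dict Char Int :=
  PySem.Dict.ofList [('T',0),('R',0),('F',0),('C',0),('M',0),('J',0),('A',0),('N',0)]

-- dataDic[k] += v  (none = KeyError; excluded by Pre_solution)
def solAdd (d : PySem.Dict Char Int) (k : Char) (v : Int) : Option (PySem.Dict Char Int) :=
  match d.get? k with
  | some old => some (d.insert k (old + v))
  | none => none

-- one iteration of 'for i in range(0, arrayLeng)'; i is a nonnegative index below
-- len(survey), so survey[i] is plain forward indexing (getElem?, exact here); choices[i]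
-- may be out of range (none = IndexError, excluded by Pre_solution)
def solStep (survey : List String) (choices : List Int)
    (st : Option (PySem.Dict Char Int)) (i : Nat) : Option (PySem.Dict Char Int) :=
  match st with
  | none => none
  | some d =>
    match survey[i]? with
    | none => none
    | some s =>
      match PySem.Str.pyGet? s 0, PySem.Str.pyGet? s 1, choices[i]? with
      | some firstChar, some secondChar, some c =>
        if c = 4 then some d
        else
          match (if 4 < c then solAdd d secondChar (c - 4) else some d) with
          | none => none
          | some d1 => if c < 4 then solAdd d1 firstChar (4 - c) else some d1
      | _, _, _ => none

def solution (survey : List String) (choices : List Int) : String :=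
  match (List.range survey.length).foldl (solStep survey choices) (some solInit) with
  | none => ""   -- an exception was raised; such inputs are excluded by Pre_solution
  | some d =>
    -- the eight keys are always present in every reachable dict (solAdd only overwrites
    -- existing keys), so the final dataDic["…"] lookups never raise: getD 0 is exact here
    let g : Char → Int := fun k => d.getD k 0
    ((if g 'T' > g 'R' then "T" else if g 'T' = g 'R' then "R" else "") ++ (if g 'T' < g 'R' then "R" else "")) ++
    (((if g 'F' > g 'C' then "F" else if g 'F' = g 'C' then "C" else "") ++ (if g 'F' < g 'C' then "C" else "")) ++
    (((if g 'M' > g 'J' then "M" else if g 'M' = g 'J' then "J" else "") ++ (if g 'M' < g 'J' then "J" else "")) ++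
    ((if g 'A' > g 'N' then "A" else if g 'A' = g 'N' then "A" else "") ++ (if g 'A' < g 'N' then "N" else ""))))

-- ===== PORT B =====

-- sum(4 - c for s, c in zip(survey, choices) if c < 4 and s[0] == L)
-- (none = IndexError on s[0], excluded by Pre_solution)
def altSum1 (ps : List (String × Int)) (L : Char) : Option Int :=
  ps.foldl (fun (acc : Option Int) (p : String × Int) =>
    match acc with
    | none => none
    | some a =>
      if p.2 < 4 then
        match PySem.Str.pyGet? p.1 0 with
        | none => none
        | some ch => if ch = L then some (a + (4 - p.2)) else some a
      else some a) (some (0 : Int))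

-- sum(c - 4 for s, c in zip(survey, choices) if c > 4 and s[1] == L)
def altSum2 (ps : List (String × Int)) (L : Char) : Option Int :=
  ps.foldl (fun (acc : Option Int) (p : String × Int) =>
    match acc with
    | none => none
    | some a =>
      if 4 < p.2 then
        match PySem.Str.pyGet? p.1 1 with
        | none => none
        | some ch => if ch = L then some (a + (p.2 - 4)) else some a
      else some a) (some (0 : Int))

-- score(L)
def altScore (ps : List (String × Int)) (L : Char) : Option Int :=
  match altSum1 ps L, altSum2 ps L with
  | some a, some b => some (a + b)
  | _, _ => none

-- max(pair, key=lambda L: (score(L), -ord(L))): starting from the first letter x,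
-- replace by y iff key(y) > key(x) (lexicographic tuple comparison)
def altPick (ps : List (String × Int)) (x y : Char) : Option Char :=
  match altScore ps x, altScore ps y with
  | some sx, some sy =>
    some (if sy > sx ∨ (sy = sx ∧ (-(y.toNat : Int)) > -(x.toNat : Int)) then y else x)
  | _, _ => none

def solution_alt (survey : List String) (choices : List Int) : String :=
  let ps := survey.zip choices
  match altPick ps 'T' 'R', altPick ps 'F' 'C', altPick ps 'M' 'J', altPick ps 'A' 'N' with
  | some c1, some c2, some c3, some c4 => String.ofList [c1, c2, c3, c4]
  | _, _, _, _ => ""   -- an exception; excluded by Pre_solution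

-- ===== PRECONDITION & SPEC =====

def pvGood (ch : Char) : Prop := ch ∈ (['T', 'R', 'F', 'C', 'M', 'J', 'A', 'N'] : List Char)

-- exactly the inputs on which A returns: choices at least as long as survey (else
-- IndexError), every survey entry at least two characters long (else IndexError), and the
-- character that gets incremented (the first for choices[i] < 4, the second for
-- choices[i] > 4) is one of the eight counter keys (else KeyError)
def Pre_solution (survey : List String) (choices : List Int) : Prop :=
  survey.length ≤ choices.length ∧
  ∀ i, i < survey.length →
    2 ≤ (survey.getD i "").toList.length ∧
    (choices.getD i 4 < 4 → pvGood ((survey.getD i "").toList.getD 0 ' ')) ∧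
    (4 < choices.getD i 4 → pvGood ((survey.getD i "").toList.getD 1 ' '))

instance (survey : List String) (choices : List Int) : Decidable (Pre_solution survey choices) := by
  unfold Pre_solution pvGood; infer_instance

def pvWitness_solution : List String × List Int := (["TR", "CF"], [1, 7])

def Spec_solution (survey : List String) (choices : List Int) (out : String) : Prop :=
  out = solution_alt survey choices

instance (survey : List String) (choices : List Int) (out : String) :
    Decidable (Spec_solution survey choices out) := by unfold Spec_solution; infer_instance

-- ===== CLAIM (what is proved, stated in full; the proofs are below) =====
def Claim_equal_solution : Prop := ∀ (survey : List String) (choices : List Int), Dom_solution survey choices → Pre_solution survey choices → Spec_solution survey choices (solution survey choices)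

-- ===== LEMMAS AND PROOFS =====

-- all eight counter keys are present in the dict
def pvKeys (d : PySem.Dict Char Int) : Prop :=
  (d.get? 'T').isSome ∧ (d.get? 'R').isSome ∧ (d.get? 'F').isSome ∧ (d.get? 'C').isSome ∧
  (d.get? 'M').isSome ∧ (d.get? 'J').isSome ∧ (d.get? 'A').isSome ∧ (d.get? 'N').isSome

-- the total per-letter score of a list of (question, choice) pairs: what both A's dict
-- entry for L and B's score(L) compute under Pre_
def pvScore (ps : List (String × Int)) (L : Char) : Int :=
  ps.foldl (fun a p =>
    a + (if p.2 < 4 ∧ p.1.toList.getD 0 ' ' = L then 4 - p.2 else 0)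
      + (if 4 < p.2 ∧ p.1.toList.getD 1 ' ' = L then p.2 - 4 else 0)) 0

theorem pv_getD_insert (d : PySem.Dict Char Int) (k k' : Char) (w : Int) :
    (d.insert k w).getD k' 0 = if k' = k then w else d.getD k' 0 := by
  by_cases h : k' = k
  · subst h; simp [PySem.Dict.getD_insert_self]
  · rw [PySem.Dict.getD_insert_of_ne _ _ _ h]; simp [h]

theorem pv_isSome_insert (d : PySem.Dict Char Int) (k k' : Char) (v : Int)
    (h : (d.get? k').isSome) : ((d.insert k v).get? k').isSome := by
  by_cases hk : k' = k
  · subst hk; rw [PySem.Dict.get?_insert_self]; simp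
  · rw [PySem.Dict.get?_insert_of_ne _ _ hk]; exact h

theorem pvKeys_insert (d : PySem.Dict Char Int) (k : Char) (v : Int) (h : pvKeys d) :
    pvKeys (d.insert k v) := by
  obtain ⟨h1, h2, h3, h4, h5, h6, h7, h8⟩ := h
  exact ⟨pv_isSome_insert _ _ _ _ h1, pv_isSome_insert _ _ _ _ h2, pv_isSome_insert _ _ _ _ h3,
    pv_isSome_insert _ _ _ _ h4, pv_isSome_insert _ _ _ _ h5, pv_isSome_insert _ _ _ _ h6,
    pv_isSome_insert _ _ _ _ h7, pv_isSome_insert _ _ _ _ h8⟩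

-- solAdd on a present key: succeeds, keeps the keys, and shifts the getD of exactly that key
theorem pvAdd_sim (d : PySem.Dict Char Int) (k : Char) (v : Int)
    (hk : pvGood k) (hd : pvKeys d) :
    ∃ d', solAdd d k v = some d' ∧ pvKeys d' ∧
      ∀ L, d'.getD L 0 = d.getD L 0 + (if k = L then v else 0) := by
  have hsome : (d.get? k).isSome := by
    obtain ⟨h1, h2, h3, h4, h5, h6, h7, h8⟩ := hd
    simp only [pvGood, List.mem_cons, List.not_mem_nil, or_false] at hk
    rcases hk with rfl | rfl | rfl | rfl | rfl | rfl | rfl | rfl <;> assumption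
  obtain ⟨old, hold⟩ := Option.isSome_iff_exists.mp hsome
  refine ⟨d.insert k (old + v), by simp [solAdd, hold], pvKeys_insert _ _ _ hd, fun L => ?_⟩
  rw [pv_getD_insert]
  by_cases h : L = k
  · subst h; simp [PySem.Dict.getD_eq_get?_getD, hold]
  · have h2 : ¬ k = L := fun hh => h hh.symm
    simp [h, h2]

-- shifting the loop index: iteration i+1 over (s :: rest, c :: cs) is iteration i over the tails
theorem pv_step_succ (s : String) (rest : List String) (c : Int) (cs : List Int)
    (st : Option (PySem.Dict Char Int)) (i : Nat) :
    solStep (s :: rest) (c :: cs) st (i + 1) = solStep rest cs st i := by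
  cases st <;> simp [solStep]

-- the head iteration of A's loop, in terms of pvScore of the single head pair
theorem pv_head (s : String) (rest : List String) (c : Int) (cs : List Int)
    (d : PySem.Dict Char Int)
    (hlen2 : 2 ≤ s.toList.length)
    (hlt : c < 4 → pvGood (s.toList.getD 0 ' '))
    (hgt : 4 < c → pvGood (s.toList.getD 1 ' '))
    (hd : pvKeys d) :
    ∃ d1, solStep (s :: rest) (c :: cs) (some d) 0 = some d1 ∧ pvKeys d1 ∧
      ∀ L, d1.getD L 0 = d.getD L 0 + pvScore [(s, c)] L := by
  obtain ⟨fc, hfc⟩ : ∃ x, s.toList[0]? = some x :=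
    ⟨_, List.getElem?_eq_getElem (by omega : 0 < s.toList.length)⟩
  obtain ⟨sc, hsc⟩ : ∃ x, s.toList[1]? = some x :=
    ⟨_, List.getElem?_eq_getElem (by omega : 1 < s.toList.length)⟩
  have hgd0 : s.toList.getD 0 ' ' = fc := by rw [List.getD_eq_getElem?_getD, hfc]; rfl
  have hgd1 : s.toList.getD 1 ' ' = sc := by rw [List.getD_eq_getElem?_getD, hsc]; rfl
  rw [hgd0] at hlt
  rw [hgd1] at hgt
  have hp0 : PySem.List.pyGet? s.toList 0 = some fc := by simpa [pysem] using hfc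
  have hp1 : PySem.List.pyGet? s.toList 1 = some sc := by simpa [pysem] using hsc
  rcases lt_trichotomy c 4 with hc | hc | hc
  · obtain ⟨d1, hAdd, hK1, hGet⟩ := pvAdd_sim d fc (4 - c) (hlt hc) hd
    refine ⟨d1, ?_, hK1, fun L => ?_⟩
    · simp [solStep, hp0, hp1, show ¬ (c = 4) by omega, show ¬ (4 < c) by omega, hc, hAdd]
    · rw [hGet L]
      simp [pvScore, List.getD_eq_getElem?_getD, hfc, hc, show ¬ (4 < c) by omega]
  · exact ⟨d, by simp [solStep, hp0, hp1, hc], hd,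
      fun L => by simp [pvScore, hc]⟩
  · obtain ⟨d1, hAdd, hK1, hGet⟩ := pvAdd_sim d sc (c - 4) (hgt hc) hd
    refine ⟨d1, ?_, hK1, fun L => ?_⟩
    · simp [solStep, hp0, hp1, show ¬ (c = 4) by omega, show ¬ (c < 4) by omega, hc, hAdd]
    · rw [hGet L]
      simp [pvScore, List.getD_eq_getElem?_getD, hsc, hc, show ¬ (c < 4) by omega]

-- folds of the shape 'b + f p' shift their initial value out
theorem pv_foldl_shift (f : String × Int → Int) (g : Int → String × Int → Int)
    (hg : ∀ b p, g b p = b + f p) :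
    ∀ (ps : List (String × Int)) (v : Int), ps.foldl g v = v + ps.foldl g 0
  | [], v => by simp
  | p :: ps, v => by
    rw [List.foldl_cons, List.foldl_cons, pv_foldl_shift f g hg ps (g v p),
      pv_foldl_shift f g hg ps (g 0 p), hg v p, hg 0 p]
    ring

theorem pv_shiftScore (L : Char) : ∀ (ps : List (String × Int)) (v : Int),
    ps.foldl (fun a p =>
      a + (if p.2 < 4 ∧ p.1.toList.getD 0 ' ' = L then 4 - p.2 else 0)
        + (if 4 < p.2 ∧ p.1.toList.getD 1 ' ' = L then p.2 - 4 else 0)) v =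
    v + ps.foldl (fun a p =>
      a + (if p.2 < 4 ∧ p.1.toList.getD 0 ' ' = L then 4 - p.2 else 0)
        + (if 4 < p.2 ∧ p.1.toList.getD 1 ' ' = L then p.2 - 4 else 0)) 0 :=
  pv_foldl_shift
    (fun p => (if p.2 < 4 ∧ p.1.toList.getD 0 ' ' = L then 4 - p.2 else 0)
      + (if 4 < p.2 ∧ p.1.toList.getD 1 ' ' = L then p.2 - 4 else 0)) _
    (fun b p => by ring)

theorem pv_shift1 (L : Char) : ∀ (ps : List (String × Int)) (v : Int),
    ps.foldl (fun b p => b + (if p.2 < 4 ∧ p.1.toList.getD 0 ' ' = L then 4 - p.2 else 0)) v =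
    v + ps.foldl (fun b p => b + (if p.2 < 4 ∧ p.1.toList.getD 0 ' ' = L then 4 - p.2 else 0)) 0 :=
  pv_foldl_shift (fun p => (if p.2 < 4 ∧ p.1.toList.getD 0 ' ' = L then 4 - p.2 else 0)) _
    (fun _ _ => rfl)

theorem pv_shift2 (L : Char) : ∀ (ps : List (String × Int)) (v : Int),
    ps.foldl (fun b p => b + (if 4 < p.2 ∧ p.1.toList.getD 1 ' ' = L then p.2 - 4 else 0)) v =
    v + ps.foldl (fun b p => b + (if 4 < p.2 ∧ p.1.toList.getD 1 ' ' = L then p.2 - 4 else 0)) 0 :=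
  pv_foldl_shift (fun p => (if 4 < p.2 ∧ p.1.toList.getD 1 ' ' = L then p.2 - 4 else 0)) _
    (fun _ _ => rfl)

-- pvScore splits over cons
theorem pvScore_cons (p : String × Int) (ps : List (String × Int)) (L : Char) :
    pvScore (p :: ps) L = pvScore [p] L + pvScore ps L := by
  simp only [pvScore, List.foldl_cons, List.foldl_nil]
  rw [pv_shiftScore L ps]

-- the loop invariant: A's fold succeeds, keeps the eight keys, and each counter equals
-- its starting value plus the pvScore of the processed (question, choice) pairs
theorem pv_loop : ∀ (survey : List String) (choices : List Int) (d : PySem.Dict Char Int),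
    survey.length ≤ choices.length →
    (∀ i, i < survey.length →
      2 ≤ (survey.getD i "").toList.length ∧
      (choices.getD i 4 < 4 → pvGood ((survey.getD i "").toList.getD 0 ' ')) ∧
      (4 < choices.getD i 4 → pvGood ((survey.getD i "").toList.getD 1 ' '))) →
    pvKeys d →
    ∃ d', (List.range survey.length).foldl (solStep survey choices) (some d) = some d' ∧
      pvKeys d' ∧ ∀ L, d'.getD L 0 = d.getD L 0 + pvScore (survey.zip choices) L
  | [], _, d, _, _, hd => ⟨d, by simp, hd, fun L => by simp [pvScore]⟩
  | s :: rest, [], _, hlen, _, _ => by simp at hlen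
  | s :: rest, c :: cs, d, hlen, hcond, hd => by
    obtain ⟨h2, hlt, hgt⟩ := hcond 0 (by simp)
    obtain ⟨d1, hstep, hK1, hGet1⟩ :=
      pv_head s rest c cs d (by simpa using h2) (by simpa using hlt) (by simpa using hgt) hd
    obtain ⟨d', hfold, hK', hGet'⟩ := pv_loop rest cs d1 (by simpa using hlen)
      (fun i hi => by simpa using hcond (i + 1) (by simpa using hi)) hK1
    refine ⟨d', ?_, hK', fun L => ?_⟩
    · simp only [List.length_cons]
      rw [List.range_succ_eq_map, List.foldl_cons, hstep, List.foldl_map]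
      have hfun : (fun st (i : Nat) => solStep (s :: rest) (c :: cs) st (i + 1)) =
          solStep rest cs :=
        funext fun st => funext fun i => pv_step_succ s rest c cs st i
      simpa [hfun] using hfold
    · rw [List.zip_cons_cons, pvScore_cons, hGet' L, hGet1 L]; ring

-- B's two sums succeed and compute pvScore when every question has length ≥ 2
theorem pv_altSum1 : ∀ (ps : List (String × Int)) (L : Char) (a : Int),
    (∀ p ∈ ps, 2 ≤ p.1.toList.length) →
    ps.foldl (fun (acc : Option Int) (p : String × Int) =>
      match acc with
      | none => none
      | some a =>
        if p.2 < 4 then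
          match PySem.Str.pyGet? p.1 0 with
          | none => none
          | some ch => if ch = L then some (a + (4 - p.2)) else some a
        else some a) (some a) =
    some (a + ps.foldl (fun b p => b + (if p.2 < 4 ∧ p.1.toList.getD 0 ' ' = L then 4 - p.2 else 0)) 0)
  | [], L, a, _ => by simp
  | p :: ps, L, a, h => by
    have hlen := h p (by simp)
    obtain ⟨fc, hfc⟩ : ∃ x, p.1.toList[0]? = some x :=
      ⟨_, List.getElem?_eq_getElem (by omega : 0 < p.1.toList.length)⟩
    have hgd : p.1.toList.getD 0 ' ' = fc := by rw [List.getD_eq_getElem?_getD, hfc]; rfl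
    have hp : PySem.Str.pyGet? p.1 0 = some fc := by simpa [pysem] using hfc
    have ih := fun a' => pv_altSum1 ps L a' (fun q hq => h q (List.mem_cons_of_mem _ hq))
    by_cases hc : p.2 < 4
    · by_cases he : fc = L
      · have hif : (if p.2 < 4 ∧ p.1.toList.getD 0 ' ' = L then 4 - p.2 else 0) = 4 - p.2 :=
          if_pos ⟨hc, hgd.trans he⟩
        simp only [List.foldl_cons, hp, hif, if_pos hc, if_pos he]
        rw [ih, pv_shift1 L ps (0 + (4 - p.2))]
        simp only [Option.some.injEq]
        ring
      · have hif : (if p.2 < 4 ∧ p.1.toList.getD 0 ' ' = L then 4 - p.2 else 0) = 0 :=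
          if_neg (fun hh => he (hgd.symm.trans hh.2))
        simp only [List.foldl_cons, hp, hif, if_pos hc, if_neg he]
        rw [ih, pv_shift1 L ps (0 + 0)]
        simp only [Option.some.injEq]
        ring
    · have hif : (if p.2 < 4 ∧ p.1.toList.getD 0 ' ' = L then 4 - p.2 else 0) = 0 :=
        if_neg (fun hh => hc hh.1)
      simp only [List.foldl_cons, hif, if_neg hc]
      rw [ih, pv_shift1 L ps (0 + 0)]
      simp only [Option.some.injEq]
      ring

theorem pv_altSum2 : ∀ (ps : List (String × Int)) (L : Char) (a : Int),
    (∀ p ∈ ps, 2 ≤ p.1.toList.length) →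
    ps.foldl (fun (acc : Option Int) (p : String × Int) =>
      match acc with
      | none => none
      | some a =>
        if 4 < p.2 then
          match PySem.Str.pyGet? p.1 1 with
          | none => none
          | some ch => if ch = L then some (a + (p.2 - 4)) else some a
        else some a) (some a) =
    some (a + ps.foldl (fun b p => b + (if 4 < p.2 ∧ p.1.toList.getD 1 ' ' = L then p.2 - 4 else 0)) 0)
  | [], L, a, _ => by simp
  | p :: ps, L, a, h => by
    have hlen := h p (by simp)
    obtain ⟨sc, hsc⟩ : ∃ x, p.1.toList[1]? = some x :=
      ⟨_, List.getElem?_eq_getElem (by omega : 1 < p.1.toList.length)⟩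
    have hgd : p.1.toList.getD 1 ' ' = sc := by rw [List.getD_eq_getElem?_getD, hsc]; rfl
    have hp : PySem.Str.pyGet? p.1 1 = some sc := by simpa [pysem] using hsc
    have ih := fun a' => pv_altSum2 ps L a' (fun q hq => h q (List.mem_cons_of_mem _ hq))
    by_cases hc : 4 < p.2
    · by_cases he : sc = L
      · have hif : (if 4 < p.2 ∧ p.1.toList.getD 1 ' ' = L then p.2 - 4 else 0) = p.2 - 4 :=
          if_pos ⟨hc, hgd.trans he⟩
        simp only [List.foldl_cons, hp, hif, if_pos hc, if_pos he]
        rw [ih, pv_shift2 L ps (0 + (p.2 - 4))]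
        simp only [Option.some.injEq]
        ring
      · have hif : (if 4 < p.2 ∧ p.1.toList.getD 1 ' ' = L then p.2 - 4 else 0) = 0 :=
          if_neg (fun hh => he (hgd.symm.trans hh.2))
        simp only [List.foldl_cons, hp, hif, if_pos hc, if_neg he]
        rw [ih, pv_shift2 L ps (0 + 0)]
        simp only [Option.some.injEq]
        ring
    · have hif : (if 4 < p.2 ∧ p.1.toList.getD 1 ' ' = L then p.2 - 4 else 0) = 0 :=
        if_neg (fun hh => hc hh.1)
      simp only [List.foldl_cons, hif, if_neg hc]
      rw [ih, pv_shift2 L ps (0 + 0)]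
      simp only [Option.some.injEq]
      ring

-- pvScore splits into B's two sums
theorem pvScore_split : ∀ (ps : List (String × Int)) (L : Char),
    pvScore ps L =
      ps.foldl (fun b p => b + (if p.2 < 4 ∧ p.1.toList.getD 0 ' ' = L then 4 - p.2 else 0)) 0 +
      ps.foldl (fun b p => b + (if 4 < p.2 ∧ p.1.toList.getD 1 ' ' = L then p.2 - 4 else 0)) 0
  | [], L => by simp [pvScore]
  | p :: ps, L => by
    rw [pvScore_cons, pvScore_split ps L, List.foldl_cons, List.foldl_cons,
      pv_shift1 L ps (0 + _), pv_shift2 L ps (0 + _)]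
    simp only [pvScore, List.foldl_cons, List.foldl_nil]
    ring

theorem pv_altScore (ps : List (String × Int)) (L : Char)
    (h : ∀ p ∈ ps, 2 ≤ p.1.toList.length) :
    altScore ps L = some (pvScore ps L) := by
  unfold altScore altSum1 altSum2
  rw [pv_altSum1 ps L 0 h, pv_altSum2 ps L 0 h]
  simp [pvScore_split]

-- A's tie-to-second-letter blocks (pairs T/R, F/C, M/J: the elif appends the second
-- letter) vs B's max-by-key pick, whose -ord tiebreak c holds for those pairs
theorem pv_block2 (x y : Int) (c : Prop) [Decidable c] (hc : c) (X Y : String) (cX cY : Char)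
    (hX : X = String.ofList [cX]) (hY : Y = String.ofList [cY]) :
    ((if x > y then X else if x = y then Y else "") ++ (if x < y then Y else "")) =
    String.ofList [if y > x ∨ (y = x ∧ c) then cY else cX] := by
  subst hX hY
  have hiff : (y > x ∨ (y = x ∧ c)) ↔ x ≤ y := by
    constructor
    · rintro (h | ⟨h, -⟩) <;> omega
    · intro h
      by_cases hxy : y = x
      · exact Or.inr ⟨hxy, hc⟩
      · exact Or.inl (by omega)
  rw [if_congr hiff rfl rfl]
  split_ifs <;> first | (exfalso; omega) | simp

-- the A/N block: the elif appends the FIRST letter; B's -ord tiebreak c fails there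
theorem pv_block1 (x y : Int) (c : Prop) [Decidable c] (hc : ¬c) (X Y : String) (cX cY : Char)
    (hX : X = String.ofList [cX]) (hY : Y = String.ofList [cY]) :
    ((if x > y then X else if x = y then X else "") ++ (if x < y then Y else "")) =
    String.ofList [if y > x ∨ (y = x ∧ c) then cY else cX] := by
  subst hX hY
  have hiff : (y > x ∨ (y = x ∧ c)) ↔ x < y := by
    constructor
    · rintro (h | ⟨-, hcc⟩)
      · omega
      · exact absurd hcc hc
    · intro h
      exact Or.inl (by omega)
  rw [if_congr hiff rfl rfl]
  split_ifs <;> first | (exfalso; omega) | simp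

-- ===== VERDICT (by name: the statement is the Claim_ definition above) =====
theorem solution_spec : Claim_equal_solution := by
  intro survey choices _ hpre
  obtain ⟨hlen, hcond⟩ := hpre
  obtain ⟨d', hfold, _, hGet⟩ := pv_loop survey choices solInit hlen hcond (by unfold pvKeys; decide)
  have hmem : ∀ p ∈ survey.zip choices, 2 ≤ p.1.toList.length := by
    intro p hp
    obtain ⟨i, hi1, hi3⟩ := List.mem_iff_getElem.mp hp
    have hi : i < survey.length := by
      have := List.length_zip (l₁ := survey) (l₂ := choices); omega
    have hz : (survey.zip choices)[i]'hi1 = (survey[i]'hi, choices[i]'(by omega)) := by simp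
    rw [hz] at hi3
    have hp1 : p.1 = survey[i]'hi := by rw [← hi3]
    rw [hp1]
    simpa [List.getD_eq_getElem?_getD, List.getElem?_eq_getElem hi] using (hcond i hi).1
  have hA := fun L => pv_altScore (survey.zip choices) L hmem
  have e : ∀ (L : Char), solInit.getD L 0 = 0 → d'.getD L 0 = pvScore (survey.zip choices) L :=
    fun L h => by rw [hGet L, h, zero_add]
  unfold Spec_solution solution solution_alt
  rw [hfold]
  simp only [altPick, hA]
  simp only [e 'T' (by decide), e 'R' (by decide), e 'F' (by decide), e 'C' (by decide),
      e 'M' (by decide), e 'J' (by decide), e 'A' (by decide), e 'N' (by decide)]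
  rw [pv_block2 _ _ _ (by decide : (-(('R'.toNat : Int))) > -(('T'.toNat : Int))) "T" "R" 'T' 'R' rfl rfl,
      pv_block2 _ _ _ (by decide : (-(('C'.toNat : Int))) > -(('F'.toNat : Int))) "F" "C" 'F' 'C' rfl rfl,
      pv_block2 _ _ _ (by decide : (-(('J'.toNat : Int))) > -(('M'.toNat : Int))) "M" "J" 'M' 'J' rfl rfl,
      pv_block1 _ _ _ (by decide : ¬((-(('N'.toNat : Int))) > -(('A'.toNat : Int)))) "A" "N" 'A' 'N' rfl rfl]
  simp [← String.ofList_append]
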